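-- pv_equiv track=rewrite | github.com/srajsonu/CodeChef | April Long Challenge 2021/6. Binary String MEX.py | build
-- ===== SOURCE A (Python) =====
-- def build(A, key):
--     key = bin(key).replace('0b', '')
--     m = len(A)
--     n = len(key)
--     i = 0
--     j = 0
--
--     while i < m and j < n:
--         if A[i] == key[j]:
--             i += 1
--             j += 1
--         else:
--             i += 1
--
--     return True if j == n else False
-- ===== SOURCE B (Python) =====
-- def build(A, key):
--     s = bin(key).replace('0b', '')
--     m = len(A)
--     # Subsequence automaton: nxt[i] maps char c to the smallest index j >= i with A[j] == c.
--     # Built in one backward pass over A; then the key string is matched by table jumps.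
--     nxt = [None] * (m + 1)
--     nxt[m] = {}
--     for i in range(m - 1, -1, -1):
--         d = dict(nxt[i + 1])
--         d[A[i]] = i
--         nxt[i] = d
--     pos = 0
--     for ch in s:
--         j = nxt[pos].get(ch)
--         if j is None:
--             return False
--         pos = j + 1
--     return True
-- ===== Notes on version B (the rewrite author's own statement) =====
-- stated objective: alternative
-- what changed: A's two-pointer scan is replaced by a subsequence automaton: one backward pass builds, for every position, a dict mapping each char to its next occurrence, and the key's binary string is then matched by table jumps instead of scanning the text char by char.
import Mathlib
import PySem

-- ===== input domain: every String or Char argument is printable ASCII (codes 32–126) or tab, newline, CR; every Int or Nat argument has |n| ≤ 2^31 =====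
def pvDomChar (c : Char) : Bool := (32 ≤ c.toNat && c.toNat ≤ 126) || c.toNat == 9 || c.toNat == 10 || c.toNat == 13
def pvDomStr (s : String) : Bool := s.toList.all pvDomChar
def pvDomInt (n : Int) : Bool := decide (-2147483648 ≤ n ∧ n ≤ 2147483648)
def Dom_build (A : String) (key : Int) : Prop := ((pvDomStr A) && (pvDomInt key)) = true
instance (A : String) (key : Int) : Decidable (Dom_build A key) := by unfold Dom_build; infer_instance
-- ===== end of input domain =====

-- B replaces A's two-pointer scan by a subsequence automaton (per-position next-occurrence
-- dicts built in one backward pass, then table jumps over the key's bits) — objective: alternative.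

-- ===== PORT A =====
-- shared helper: Python's `bin(key).replace('0b', '')` as a list of chars
def pvNatBits : Nat → List Char
  | 0 => []
  | n + 1 => pvNatBits ((n + 1) / 2) ++ [if (n + 1) % 2 = 1 then '1' else '0']
decreasing_by exact Nat.div_lt_self (Nat.succ_pos n) (by norm_num)

def pvBinKey (key : Int) : List Char :=
  if key = 0 then ['0']
  else if key < 0 then '-' :: pvNatBits key.natAbs
  else pvNatBits key.natAbs

-- A's while loop: i walks the text, j walks the key string; returns j == n
def buildLoop : List Char → List Char → Bool
  | _, [] => true
  | [], _ :: _ => false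
  | a :: as, k :: ks => if a = k then buildLoop as ks else buildLoop as (k :: ks)

def build (A : String) (key : Int) : Bool :=
  buildLoop A.toList (pvBinKey key)

-- ===== PORT B =====
-- Source B's backward pass `for i in range(m-1, -1, -1): d = dict(nxt[i+1]); d[A[i]] = i; nxt[i] = d`
-- expressed as recursion on the suffix of A carrying the absolute index i of its head.
def pvMkNxt : List Char → Nat → List (PySem.Dict Char Nat)
  | [], _ => [PySem.Dict.empty]
  | a :: as, i =>
      let rest := pvMkNxt as (i + 1)
      (rest.headD PySem.Dict.empty).insert a i :: rest

-- Source B's matching loop `for ch in s: j = nxt[pos].get(ch); …`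
-- (pos is always ≤ m when this is called from build_alt, so getD's default is never used)
def pvWalk : List Char → List (PySem.Dict Char Nat) → Nat → Bool
  | [], _, _ => true
  | c :: cs, t, pos =>
      match (t.getD pos PySem.Dict.empty).get? c with
      | none => false
      | some j => pvWalk cs t (j + 1)

def build_alt (A : String) (key : Int) : Bool :=
  pvWalk (pvBinKey key) (pvMkNxt A.toList 0) 0

-- ===== PRECONDITION & SPEC =====
def Spec_build (A : String) (key : Int) (out : Bool) : Prop := out = build_alt A key
instance (A : String) (key : Int) (out : Bool) : Decidable (Spec_build A key out) := by unfold Spec_build; infer_instance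

-- ===== CLAIM (what is proved, stated in full; the proofs are below) =====
def Claim_equal_build : Prop := ∀ (A : String) (key : Int), Dom_build A key → Spec_build A key (build A key)

-- ===== LEMMAS AND PROOFS =====
-- The head dict of the automaton for suffix `as` (offset i) is exactly "first index of c in as, plus i".
theorem pvMkNxt_head_get (as : List Char) (i : Nat) (c : Char) :
    ((pvMkNxt as i).headD PySem.Dict.empty).get? c
      = (List.findIdx? (· == c) as).map (fun j => i + j) := by
  induction as generalizing i with
  | nil => simp [pvMkNxt, PySem.Dict.get?_empty]
  | cons a as ih =>
    simp only [pvMkNxt, List.headD_cons, List.findIdx?_cons]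
    by_cases h : a = c
    · simp [h, PySem.Dict.get?_insert_self]
    · have hba : (a == c) = false := by simp [h]
      rw [PySem.Dict.get?_insert_of_ne _ _ (fun hcc => h hcc.symm), ih (i + 1)]
      simp [hba, Option.map_map]
      cases List.findIdx? (· == c) as <;> (simp; try omega)

-- Indexing the table at k is the head of the automaton of the k-th suffix.
theorem pvMkNxt_getD (as : List Char) (i k : Nat) (hk : k ≤ as.length) :
    (pvMkNxt as i).getD k PySem.Dict.empty
      = (pvMkNxt (as.drop k) (i + k)).headD PySem.Dict.empty := by
  induction k generalizing as i with
  | zero =>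
    cases as <;> simp [pvMkNxt]
  | succ k ih =>
    cases as with
    | nil => simp at hk
    | cons a as =>
      simp only [pvMkNxt, List.getD_cons_succ, List.drop_succ_cons]
      rw [ih as (i + 1) (by simpa using hk)]
      have : i + 1 + k = i + (k + 1) := by omega
      rw [this]

-- Greedy characterisation of A's loop: it jumps to the first occurrence of the current key char.
theorem buildLoop_find (as : List Char) (c : Char) (ks : List Char) :
    buildLoop as (c :: ks)
      = match List.findIdx? (· == c) as with
        | none => false
        | some j => buildLoop (as.drop (j + 1)) ks := by
  induction as generalizing c with
  | nil => simp [buildLoop]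
  | cons a as ih =>
    by_cases h : a = c
    · simp [buildLoop, List.findIdx?_cons, h]
    · have hba : (a == c) = false := by simp [h]
      simp only [buildLoop, List.findIdx?_cons, hba, if_neg h]
      rw [ih c]
      cases List.findIdx? (· == c) as <;> simp [List.drop_succ_cons]

theorem pvWalk_eq (ks : List Char) : ∀ (as : List Char) (pos : Nat), pos ≤ as.length →
    pvWalk ks (pvMkNxt as 0) pos = buildLoop (as.drop pos) ks := by
  induction ks with
  | nil => intro as pos _; simp [pvWalk, buildLoop]
  | cons c cs ih =>
    intro as pos hpos
    rw [buildLoop_find]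
    simp only [pvWalk]
    rw [pvMkNxt_getD as 0 pos hpos, pvMkNxt_head_get]
    cases hfi : List.findIdx? (· == c) (as.drop pos) with
    | none => simp
    | some j =>
      have hj : j < (as.drop pos).length := (List.findIdx?_eq_some_iff_findIdx_eq.mp hfi).1
      simp only [Option.map_some, Nat.zero_add]
      rw [ih as (pos + j + 1) (by simp [List.length_drop] at hj; omega)]
      have hdd : (as.drop pos).drop (j + 1) = as.drop (pos + j + 1) := by
        rw [List.drop_drop]
        congr 1
      rw [hdd]

-- ===== VERDICT (by name: the statement is the Claim_ definition above) =====
theorem build_spec : Claim_equal_build := by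
  intro A key _
  unfold Spec_build build build_alt
  exact (pvWalk_eq (pvBinKey key) A.toList 0 (Nat.zero_le _)).symm
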